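-- pv_equiv track=rewrite | github.com/YuhuYang/QuanSyn | src/quansyn/depval.py | _compute_hd
-- ===== SOURCE A (Python) =====
-- from typing import Any, Dict, List, Optional, Tuple
--
-- def _compute_hd(word_id: int, head_map: Dict[int, int], cache: Dict[int, int]) -> int:
--     if word_id in cache:
--         return cache[word_id]
--     current = word_id
--     depth = 0
--     in_path = set()
--     size = max(1, len(head_map))
--     while True:
--         if current in in_path:
--             depth = 0
--             break
--         in_path.add(current)
--         head = head_map.get(current)
--         if head is None:
--             depth = 0
--             break
--         if head == 0:
--             break
--         depth += 1
--         if depth > size: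
--             depth = 0
--             break
--         if head in cache:
--             depth += cache[head]
--             break
--         current = head
--     cache[word_id] = depth
--     return depth
-- ===== SOURCE B (Python) =====
-- def _compute_hd(word_id, head_map, cache):
--     if word_id in cache:
--         return cache[word_id]
--     size = max(1, len(head_map))
--     # Phase 1: materialize the parent chain as an explicit path list; stop at the
--     # first head that cannot be followed (missing, root 0, cached, revisit, or cap).
--     path = [word_id]
--     while len(path) <= size:
--         head = head_map.get(path[-1])
--         if head is None or head == 0 or head in cache or head in path:
--             break
--         path.append(head)
--     # Phase 2: classify the terminal head and derive the depth arithmetically.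
--     head = head_map.get(path[-1])
--     if head == 0:
--         depth = len(path) - 1
--         # path compression: every node on the path now has a known depth
--         for i, node in enumerate(path):
--             cache[node] = depth - i
--     elif head is not None and head in cache and len(path) <= size:
--         depth = len(path) + cache[head]
--         for i, node in enumerate(path):
--             cache[node] = depth - i
--     else:
--         depth = 0
--         cache[word_id] = 0
--     return depth
-- ===== Notes on version B (the rewrite author's own statement) =====
-- stated objective: alternative
-- what changed: B replaces A's single counter-driven walk (mutable in_path set, depth counter, five break sites) by a staged algorithm: it first materializes the parent chain as an explicit path list, then classifies the terminal head once and derives the depth arithmetically from the list length, and finally path-compresses by caching the depth of every node on the path (not just word_id), which makes repeated calls over a tree amortized O(1) per node.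
import Mathlib
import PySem

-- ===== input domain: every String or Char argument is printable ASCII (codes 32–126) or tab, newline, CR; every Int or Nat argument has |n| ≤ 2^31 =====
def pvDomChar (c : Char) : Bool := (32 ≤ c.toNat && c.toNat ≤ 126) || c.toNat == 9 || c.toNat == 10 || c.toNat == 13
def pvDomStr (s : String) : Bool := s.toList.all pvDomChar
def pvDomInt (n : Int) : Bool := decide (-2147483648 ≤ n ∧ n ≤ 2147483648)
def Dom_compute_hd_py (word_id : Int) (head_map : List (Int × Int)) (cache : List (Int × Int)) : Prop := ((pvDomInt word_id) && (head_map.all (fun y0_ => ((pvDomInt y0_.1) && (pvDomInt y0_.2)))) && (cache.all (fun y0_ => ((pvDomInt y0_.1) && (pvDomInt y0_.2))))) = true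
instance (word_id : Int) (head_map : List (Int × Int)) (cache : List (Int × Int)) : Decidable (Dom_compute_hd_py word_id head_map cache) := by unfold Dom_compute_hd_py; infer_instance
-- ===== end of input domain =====

-- B materializes the parent chain as an explicit path list, classifies the terminal head once,
-- derives the depth arithmetically from the list length, and path-compresses the cache.
-- Side effects differ: A caches only word_id; B also caches the depth of every path node on a
-- successful walk (each with the value A itself would compute there). The theorems are about the
-- RETURN value only.

-- ===== PORT A =====
-- A's 'while True' loop; fuel is only a termination bound (large enough to never run out:
-- the loop breaks once depth exceeds size, so at most size+2 iterations happen).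
def hdLoopA (hm c : PySem.Dict Int Int) (size : Int) : Nat → Int → Int → List Int → Int
  | 0, _, depth, _ => depth  -- unreachable with the fuel used below
  | fuel+1, current, depth, in_path =>
    if current ∈ in_path then 0
    else
      let in_path := PySem.Set.add in_path current
      match PySem.Dict.get? hm current with
      | none => 0
      | some head =>
        if head = 0 then depth
        else
          let depth := depth + 1
          if depth > size then 0
          else match PySem.Dict.get? c head with
            | some v => depth + v
            | none => hdLoopA hm c size fuel head depth in_path

def compute_hd_py (word_id : Int) (head_map : List (Int × Int)) (cache : List (Int × Int)) : Int :=
  let hm := PySem.Dict.ofList head_map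
  let c := PySem.Dict.ofList cache
  match PySem.Dict.get? c word_id with
  | some v => v
  | none =>
    let size : Int := max 1 (hm.size : Int)
    hdLoopA hm c size (size.toNat + 2) word_id 0 []

-- ===== PORT B =====
-- B's phase 1: extend the path while len(path) <= size and the last node's head is followable.
-- The path is kept MOST-RECENT-FIRST (Python appends at the end); only its first element,
-- its length and membership in it are used, so the representation is faithful.
-- Fuel = size.toNat suffices: the loop body recurses only after an append, and once the list
-- has grown by size elements the while-condition is false anyway.
def hdBuildB (hm c : PySem.Dict Int Int) (size : Int) : Nat → List Int → List Int
  | 0, path => path  -- while-condition already false here (see fuel comment)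
  | fuel+1, path =>
    if (path.length : Int) ≤ size then
      match PySem.Dict.get? hm (path.headD 0) with
      | none => path
      | some head =>
        if head = 0 ∨ PySem.Dict.contains c head ∨ head ∈ path then path
        else hdBuildB hm c size fuel (head :: path)
    else path

-- B's phase 2: classify the terminal head; the cache back-fill is a side effect with no
-- bearing on the return value, so it has no counterpart here.
def hdClassifyB (hm c : PySem.Dict Int Int) (size : Int) (path : List Int) : Int :=
  match PySem.Dict.get? hm (path.headD 0) with
  | none => 0
  | some head =>
    if head = 0 then (path.length : Int) - 1
    else if PySem.Dict.contains c head ∧ (path.length : Int) ≤ size then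
      (path.length : Int) + PySem.Dict.getD c head 0
    else 0

def compute_hd_py_alt (word_id : Int) (head_map : List (Int × Int)) (cache : List (Int × Int)) : Int :=
  let hm := PySem.Dict.ofList head_map
  let c := PySem.Dict.ofList cache
  match PySem.Dict.get? c word_id with
  | some v => v
  | none =>
    let size : Int := max 1 (hm.size : Int)
    hdClassifyB hm c size (hdBuildB hm c size size.toNat [word_id])

-- ===== PRECONDITION & SPEC =====
def Spec_compute_hd_py (word_id : Int) (head_map : List (Int × Int)) (cache : List (Int × Int)) (out : Int) : Prop := out = compute_hd_py_alt word_id head_map cache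
instance (word_id : Int) (head_map : List (Int × Int)) (cache : List (Int × Int)) (out : Int) : Decidable (Spec_compute_hd_py word_id head_map cache out) := by unfold Spec_compute_hd_py; infer_instance

-- ===== CLAIM =====
def Claim_equal_compute_hd_py : Prop := ∀ (word_id : Int) (head_map : List (Int × Int)) (cache : List (Int × Int)), Dom_compute_hd_py word_id head_map cache → Spec_compute_hd_py word_id head_map cache (compute_hd_py word_id head_map cache)

-- ===== LEMMAS AND PROOFS =====

-- Lockstep correspondence: A at state (current, depth, path) with current ∉ path and
-- depth = |path| equals B's classification of the path built from current :: path.reverse.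
theorem hd_loop_eq (hm c : PySem.Dict Int Int) (size : Int) :
    ∀ (fa fb : Nat) (current depth : Int) (path : List Int),
    depth = (path.length : Int) →
    current ∉ path →
    (size - depth).toNat + 2 ≤ fa →
    (size - depth).toNat ≤ fb →
    hdLoopA hm c size fa current depth path
      = hdClassifyB hm c size (hdBuildB hm c size fb (current :: path.reverse)) := by
  intro fa
  induction fa with
  | zero => intro fb current depth path _ _ hfa _; omega
  | succ fa ih =>
    intro fb current depth path hdep hmem hfa hfb
    have hlen : ((current :: path.reverse).length : Int) = depth + 1 := by
      simp [hdep]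
    simp only [hdLoopA]
    rw [if_neg hmem]
    have haddeq : PySem.Set.add path current = path ++ [current] := by
      simp [PySem.Set.add, hmem]
    rw [haddeq]
    by_cases hcap : depth + 1 > size
    · -- while-condition false: B returns the path unchanged whatever the fuel is
      have hwh : ¬ ((current :: path.reverse).length : Int) ≤ size := by omega
      have hbuild : hdBuildB hm c size fb (current :: path.reverse) = current :: path.reverse := by
        cases fb with
        | zero => rfl
        | succ fb => simp only [hdBuildB]; rw [if_neg hwh]
      rw [hbuild]
      cases hhd : PySem.Dict.get? hm current with
      | none => simp [hdClassifyB, hhd]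
      | some head =>
        simp only []
        by_cases hh0 : head = 0
        · subst hh0; simp [hdClassifyB, hhd, hdep]
        · rw [if_neg hh0, if_pos hcap]
          simp only [hdClassifyB, List.headD, hhd]
          rw [if_neg hh0, if_neg (by push Not; intro _; omega)]
    · -- while-condition true: B inspects the head of current
      have hlt : depth < size := by omega
      have hfb1 : 1 ≤ fb := by omega
      obtain ⟨fb', rfl⟩ : ∃ fb', fb = fb' + 1 := ⟨fb - 1, by omega⟩
      simp only [hdBuildB]
      rw [if_pos (by simp only [hlen]; omega)]
      simp only [List.headD]
      cases hhd : PySem.Dict.get? hm current with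
      | none => simp [hdClassifyB, hhd]
      | some head =>
        simp only []
        by_cases hh0 : head = 0
        · subst hh0
          rw [if_pos (Or.inl rfl)]
          simp [hdClassifyB, hhd, hdep]
        · rw [if_neg hh0, if_neg hcap]
          cases hch : PySem.Dict.get? c head with
          | some v =>
            -- cache hit: both return depth + 1 + v
            have hcont : PySem.Dict.contains c head = true := by
              have h := PySem.Dict.get?_eq_none_iff_contains (d := c) (k := head)
              cases hc : PySem.Dict.contains c head
              · rw [h.mpr hc] at hch; cases hch
              · rfl
            rw [if_pos (Or.inr (Or.inl hcont))]
            simp only [hdClassifyB, List.headD, hhd]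
            rw [if_neg hh0, if_pos ⟨hcont, by omega⟩]
            rw [PySem.Dict.getD_eq_get?_getD, hch]
            simp only [Option.getD_some]
            omega
          | none =>
            have hcont : PySem.Dict.contains c head = false := by
              rw [← PySem.Dict.get?_eq_none_iff_contains]; exact hch
            by_cases hrep : head ∈ (current :: path.reverse)
            · -- revisit: B stops with 0; A takes one more step and hits its cycle check
              rw [if_pos (Or.inr (Or.inr hrep))]
              obtain ⟨fa', rfl⟩ : ∃ fa', fa = fa' + 1 := ⟨fa - 1, by omega⟩
              have hrep' : head ∈ path ++ [current] := by
                rcases List.mem_cons.mp hrep with h | h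
                · exact List.mem_append.mpr (Or.inr (by simp [h]))
                · exact List.mem_append.mpr (Or.inl (List.mem_reverse.mp h))
              simp only [hdLoopA]
              rw [if_pos hrep']
              simp only [hdClassifyB, List.headD, hhd]
              rw [if_neg hh0, if_neg (by rintro ⟨h1, _⟩; rw [hcont] at h1; cases h1)]
            · -- extend: both recurse in lockstep
              rw [if_neg (by push Not; exact ⟨hh0, by simp [hcont], hrep⟩)]
              have hmem' : head ∉ path ++ [current] := by
                intro hcontra
                rcases List.mem_append.mp hcontra with h | h
                · exact hrep (List.mem_cons.mpr (Or.inr (List.mem_reverse.mpr h)))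
                · exact hrep (List.mem_cons.mpr (Or.inl (List.mem_singleton.mp h)))
              have hrev : head :: (current :: path.reverse) = head :: (path ++ [current]).reverse := by
                simp
              rw [hrev]
              exact ih fb' head (depth + 1) (path ++ [current]) (by simp [hdep])
                hmem' (by omega) (by omega)

-- ===== VERDICT =====
theorem compute_hd_py_spec : Claim_equal_compute_hd_py := by
  intro word_id head_map cache _
  unfold Spec_compute_hd_py compute_hd_py compute_hd_py_alt
  cases hcw : PySem.Dict.get? (PySem.Dict.ofList cache) word_id with
  | some v => simp [hcw]
  | none =>
    simp only [hcw]
    have hsz : (1:Int) ≤ max 1 ((PySem.Dict.ofList head_map).size : Int) := le_max_left _ _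
    have h := hd_loop_eq (PySem.Dict.ofList head_map) (PySem.Dict.ofList cache)
      (max 1 ((PySem.Dict.ofList head_map).size : Int))
      ((max 1 ((PySem.Dict.ofList head_map).size : Int)).toNat + 2)
      (max 1 ((PySem.Dict.ofList head_map).size : Int)).toNat
      word_id 0 [] (by simp) (by simp) (by omega) (by omega)
    simpa using h
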